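-- pv_equiv track=rewrite | github.com/Matthew7727/DailyCodingProblems | Challenges/6/solution.py | replaceWithDigits
-- ===== SOURCE A (Python) =====
-- consonant_to_digit = {
--     1: ['b', 'f' ,'p', 'v'],
--     2: ['c','g', 'j', 'k', 'q', 's', 'x', 'z'],
--     3: ['d' ,'t'],
--     4: ['l'],
--     5: ['m' , 'n'],
--     6: ['r'],
-- }
--
-- def replaceWithDigits(name: str):
--     for i in range(6):
--         letters = consonant_to_digit.get(i+1)
--         for char in letters:
--             if (name.find(str(i+1)) < 0):
--                 name = name.replace(char, str(i+1))
--             else: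
--                 name = name.replace(char, '')
--
--     return(name)
-- ===== SOURCE B (Python) =====
-- consonant_to_digit = {
--     1: ['b', 'f', 'p', 'v'],
--     2: ['c', 'g', 'j', 'k', 'q', 's', 'x', 'z'],
--     3: ['d', 't'],
--     4: ['l'],
--     5: ['m', 'n'],
--     6: ['r'],
-- }
--
-- def replaceWithDigits(name: str):
--     # One mapping, computed from the original name, then a single pass:
--     # per group, every letter is deleted, except the first group letter that
--     # occurs in name, which becomes the group digit -- unless the digit is
--     # already present in name, in which case all the group's letters vanish.
--     action = {}
--     for digit, letters in consonant_to_digit.items():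
--         d = str(digit)
--         keeper_found = d in name
--         for ch in letters:
--             if not keeper_found and ch in name:
--                 action[ch] = d
--                 keeper_found = True
--             else:
--                 action[ch] = ''
--     return ''.join(action.get(c, c) for c in name)
-- ===== Notes on version B (the rewrite author's own statement) =====
-- stated objective: alternative
-- what changed: A makes 24 sequential full-string replace passes (one per consonant, re-scanning the mutated name each time); B derives one consonant-to-digit/deletion mapping from the original name (per group: the keeper letter and a digit-already-present flag) and emits the result in a single left-to-right pass.
import Mathlib
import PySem

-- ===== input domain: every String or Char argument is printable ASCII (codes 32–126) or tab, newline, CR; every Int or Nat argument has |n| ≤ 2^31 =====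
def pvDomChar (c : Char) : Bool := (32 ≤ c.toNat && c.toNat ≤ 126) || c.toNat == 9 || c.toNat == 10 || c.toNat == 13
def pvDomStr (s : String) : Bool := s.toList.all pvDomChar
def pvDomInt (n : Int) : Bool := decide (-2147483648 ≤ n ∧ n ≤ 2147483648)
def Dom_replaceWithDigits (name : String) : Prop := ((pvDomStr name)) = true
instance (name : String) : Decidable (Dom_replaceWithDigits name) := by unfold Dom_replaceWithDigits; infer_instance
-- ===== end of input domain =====

-- B replaces A's 24 sequential full-string replace passes by one consonant→digit/deletion
-- mapping computed from the original name plus a single left-to-right pass (objective: alternative).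

-- ===== PORT A =====
def consonantToDigit : PySem.Dict Int (List String) :=
  PySem.Dict.ofList [(1, ["b", "f", "p", "v"]), (2, ["c", "g", "j", "k", "q", "s", "x", "z"]),
    (3, ["d", "t"]), (4, ["l"]), (5, ["m", "n"]), (6, ["r"])]

def replaceWithDigits (name : String) : String :=
  (PySem.List.pyRange 0 6).foldl (fun name i =>
    -- `consonant_to_digit.get(i + 1)`: i + 1 is always a key of the literal dict, so the
    -- `None` default of Python's `.get` is never seen; `.getD []` only fills the Option type.
    let letters := (consonantToDigit.get? (i + 1)).getD []
    letters.foldl (fun name char =>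
      if PySem.Str.find name (PySem.Int.toStr (i + 1)) < 0 then
        PySem.Str.replace name char (PySem.Int.toStr (i + 1))
      else
        PySem.Str.replace name char "") name) name

-- ===== PORT B =====
def replaceWithDigits_alt (name : String) : String :=
  let action : PySem.Dict String String :=
    consonantToDigit.items.foldl (fun action p =>
      let d := PySem.Int.toStr p.1
      (p.2.foldl (fun (st : PySem.Dict String String × Bool) ch =>
          if !st.2 && PySem.Str.isIn ch name then (st.1.insert ch d, true)
          else (st.1.insert ch "", st.2))
        (action, PySem.Str.isIn d name)).1)
      PySem.Dict.empty
  PySem.Str.join "" (name.toList.map (fun c => action.getD (String.ofList [c]) (String.ofList [c])))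

-- ===== PRECONDITION & SPEC =====
def Spec_replaceWithDigits (name : String) (out : String) : Prop := out = replaceWithDigits_alt name
instance (name : String) (out : String) : Decidable (Spec_replaceWithDigits name out) := by unfold Spec_replaceWithDigits; infer_instance

-- ===== CLAIM (what is proved, stated in full; the proofs are below) =====
def Claim_equal_replaceWithDigits : Prop := ∀ (name : String), Dom_replaceWithDigits name → Spec_replaceWithDigits name (replaceWithDigits name)

-- ===== LEMMAS AND PROOFS =====

/-- Replace every occurrence of the character `ch` in `l` by the character list `r`. -/
def pvRepl (ch : Char) (r l : List Char) : List Char := l.flatMap fun c => if c = ch then r else [c]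

/-- One inner-loop step of A at the character level. -/
def pvStep (dc : Char) (l : List Char) (ch : Char) : List Char :=
  if dc ∈ l then pvRepl ch [] l else pvRepl ch [dc] l

/-- One group of A's outer loop at the character level. -/
def pvGroup (l : List Char) (g : Char × List Char) : List Char := g.2.foldl (pvStep g.1) l

/-- A's whole loop at the character level. -/
def pvA (gs : List (Char × List Char)) (l : List Char) : List Char := gs.foldl pvGroup l

/-- The per-character action for one group, read off the ORIGINAL character list `l`. -/
def pvF1 (dc : Char) (ls l : List Char) (c : Char) : List Char :=
  if c ∈ ls then
    (if dc ∈ l then [] else if ls.find? (fun x => decide (x ∈ l)) = some c then [dc] else [])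
  else [c]

/-- The per-character action of the whole group list, read off the original list `l`. -/
def pvF : List (Char × List Char) → List Char → Char → List Char
  | [], _, c => [c]
  | (dc, ls) :: gs, l, c =>
    if c ∈ ls then
      (if dc ∈ l then [] else if ls.find? (fun x => decide (x ∈ l)) = some c then [dc] else [])
    else pvF gs l c

/-- The concrete group table, at the character level. -/
def pvGroups : List (Char × List Char) :=
  [('1', ['b', 'f', 'p', 'v']), ('2', ['c', 'g', 'j', 'k', 'q', 's', 'x', 'z']),
   ('3', ['d', 't']), ('4', ['l']), ('5', ['m', 'n']), ('6', ['r'])]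

/-- Well-formedness of a group table: digits are never letters, digits are pairwise
distinct, letter lists are pairwise disjoint and duplicate-free. -/
def pvOK (gs : List (Char × List Char)) : Prop :=
  (∀ g ∈ gs, ∀ g' ∈ gs, g.1 ∉ g'.2) ∧ gs.Pairwise (fun a b => a.1 ≠ b.1) ∧
    gs.Pairwise (fun a b => ∀ c ∈ b.2, c ∉ a.2) ∧ ∀ g ∈ gs, g.2.Nodup

lemma pvOK_tail {g : Char × List Char} {gs : List (Char × List Char)} (h : pvOK (g :: gs)) : pvOK gs := by
  obtain ⟨h1, h2, h3, h4⟩ := h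
  exact ⟨fun a ha b hb => h1 a (List.mem_cons_of_mem _ ha) b (List.mem_cons_of_mem _ hb),
    h2.of_cons, h3.of_cons, fun a ha => h4 a (List.mem_cons_of_mem _ ha)⟩

lemma mem_pvRepl (x ch : Char) (r l : List Char) :
    x ∈ pvRepl ch r l ↔ (x ∈ l ∧ x ≠ ch) ∨ (ch ∈ l ∧ x ∈ r) := by
  simp only [pvRepl, List.mem_flatMap]
  constructor
  · rintro ⟨c, hc, hx⟩
    by_cases h : c = ch
    · subst h; rw [if_pos rfl] at hx; exact Or.inr ⟨hc, hx⟩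
    · rw [if_neg h] at hx; simp at hx; subst hx; exact Or.inl ⟨hc, h⟩
  · rintro (⟨hl, hne⟩ | ⟨hch, hr⟩)
    · exact ⟨x, hl, by simp [hne]⟩
    · exact ⟨ch, hch, by simp [hr]⟩

lemma pvRepl_of_not_mem {ch : Char} {l : List Char} (r : List Char) (h : ch ∉ l) :
    pvRepl ch r l = l := by
  unfold pvRepl
  rw [List.flatMap_congr (g := fun c => [c]) (fun c hc => if_neg (by rintro rfl; exact h hc))]
  simp

lemma find?_congr {p q : Char → Bool} : ∀ (ls : List Char), (∀ x ∈ ls, p x = q x) →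
    ls.find? p = ls.find? q := by
  intro ls h
  induction ls with
  | nil => rfl
  | cons a t ih =>
    simp only [List.find?_cons]
    rw [h a (by simp)]
    cases q a
    · exact ih (fun x hx => h x (by simp [hx]))
    · rfl

lemma pvGroup_eq (dc : Char) (ls l : List Char) (hd : dc ∉ ls) :
    pvGroup l (dc, ls) = l.flatMap (pvF1 dc ls l) := by
  induction ls generalizing l with
  | nil =>
    rw [List.flatMap_congr (g := fun c => [c]) (fun c hc => by simp [pvF1])]
    simp [pvGroup]
  | cons ch rest ih =>
    have hdch : dc ≠ ch := fun h => hd (h ▸ List.mem_cons_self ..)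
    have hdr : dc ∉ rest := fun h => hd (List.mem_cons_of_mem _ h)
    show pvGroup (pvStep dc l ch) (dc, rest) = _
    rw [ih _ hdr]
    by_cases hdl : dc ∈ l
    · have hdl' : dc ∈ pvStep dc l ch := by
        rw [pvStep, if_pos hdl, mem_pvRepl]; exact Or.inl ⟨hdl, hdch⟩
      rw [List.flatMap_congr (g := fun c => if c ∈ rest then [] else [c])
        (fun c hc => by simp [pvF1, hdl'])]
      rw [pvStep, if_pos hdl, pvRepl, List.flatMap_assoc]
      refine List.flatMap_congr fun c hc => ?_
      by_cases hcch : c = ch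
      · subst hcch; simp [pvF1, hdl]
      · simp only [if_neg hcch, List.flatMap_singleton]
        simp [pvF1, hdl, hcch]
    · by_cases hch : ch ∈ l
      · have hdl' : dc ∈ pvStep dc l ch := by
          rw [pvStep, if_neg hdl, mem_pvRepl]; exact Or.inr ⟨hch, by simp⟩
        rw [List.flatMap_congr (g := fun c => if c ∈ rest then [] else [c])
          (fun c hc => by simp [pvF1, hdl'])]
        rw [pvStep, if_neg hdl, pvRepl, List.flatMap_assoc]
        refine List.flatMap_congr fun c hc => ?_
        by_cases hcch : c = ch
        · subst hcch
          simp [pvF1, hdl, hdr, hch, List.find?_cons]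
        · simp only [if_neg hcch, List.flatMap_singleton]
          simp [pvF1, hdl, hcch, List.find?_cons, hch, Ne.symm hcch]
      · have hstep : pvStep dc l ch = l := by
          rw [pvStep, if_neg hdl]; exact pvRepl_of_not_mem _ hch
        rw [hstep]
        refine List.flatMap_congr fun c hc => ?_
        have hcch : c ≠ ch := fun h => hch (h ▸ hc)
        simp [pvF1, hcch, List.find?_cons, hch]

lemma mem_pvGroup {dc : Char} {ls : List Char} (l : List Char) {x : Char}
    (hd : dc ∉ ls) (hx1 : x ∉ ls) (hx2 : x ≠ dc) : x ∈ pvGroup l (dc, ls) ↔ x ∈ l := by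
  rw [pvGroup_eq dc ls l hd]
  simp only [List.mem_flatMap]
  constructor
  · rintro ⟨c, hc, hm⟩
    revert hm
    unfold pvF1
    split_ifs with h1 h2 h3 <;> simp_all
  · intro h
    exact ⟨x, h, by simp [pvF1, hx1]⟩

lemma pvF_congr : ∀ (gs : List (Char × List Char)) (l1 l2 : List Char),
    (∀ g ∈ gs, (g.1 ∈ l1 ↔ g.1 ∈ l2) ∧ ∀ ch ∈ g.2, (ch ∈ l1 ↔ ch ∈ l2)) →
    ∀ c, pvF gs l1 c = pvF gs l2 c := by
  intro gs
  induction gs with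
  | nil => intro _ _ _ _; rfl
  | cons g gs ih =>
    intro l1 l2 h c
    obtain ⟨dc, ls⟩ := g
    obtain ⟨hdig, hlet⟩ := h _ (List.mem_cons_self ..)
    show pvF ((dc, ls) :: gs) l1 c = pvF ((dc, ls) :: gs) l2 c
    unfold pvF
    rw [find?_congr (p := fun x => decide (x ∈ l1)) (q := fun x => decide (x ∈ l2)) ls
      (fun x hx => by rw [decide_eq_decide]; exact hlet x hx)]
    by_cases hc : c ∈ ls
    · simp only [if_pos hc]
      by_cases h1 : dc ∈ l2
      · rw [if_pos (hdig.mpr h1), if_pos h1]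
      · rw [if_neg (fun hh => h1 (hdig.mp hh)), if_neg h1]
    · simp only [if_neg hc]
      exact ih l1 l2 (fun g hg => h g (List.mem_cons_of_mem _ hg)) c

lemma pvF_of_not_mem : ∀ (gs : List (Char × List Char)) (l : List Char) (c : Char),
    (∀ g ∈ gs, c ∉ g.2) → pvF gs l c = [c] := by
  intro gs
  induction gs with
  | nil => intro _ _ _; rfl
  | cons g gs ih =>
    intro l c h
    obtain ⟨dc, ls⟩ := g
    unfold pvF
    rw [if_neg (h _ (List.mem_cons_self ..)), ih l c (fun g hg => h g (List.mem_cons_of_mem _ hg))]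

lemma pvA_eq : ∀ (gs : List (Char × List Char)), pvOK gs → ∀ (l : List Char),
    pvA gs l = l.flatMap (pvF gs l) := by
  intro gs
  induction gs with
  | nil =>
    intro _ l
    have h1 : List.flatMap (pvF [] l) l = l := by
      rw [List.flatMap_congr (l := l) (f := pvF [] l) (g := fun c => [c]) (fun c hc => rfl)]
      simp
    exact h1.symm
  | cons g gs ih =>
    intro h l
    obtain ⟨dc, ls⟩ := g
    have hd : dc ∉ ls := h.1 _ (List.mem_cons_self ..) _ (List.mem_cons_self ..)
    show pvA gs (pvGroup l (dc, ls)) = _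
    rw [ih (pvOK_tail h) _]
    -- replace pvF gs (pvGroup l ...) by pvF gs l
    have hmem : ∀ g' ∈ gs, (g'.1 ∈ pvGroup l (dc, ls) ↔ g'.1 ∈ l) ∧
        ∀ ch ∈ g'.2, (ch ∈ pvGroup l (dc, ls) ↔ ch ∈ l) := by
      intro g' hg'
      constructor
      · exact mem_pvGroup l hd
          (h.1 _ (List.mem_cons_of_mem _ hg') _ (List.mem_cons_self ..))
          (Ne.symm (List.rel_of_pairwise_cons h.2.1 hg'))
      · intro ch hch
        refine mem_pvGroup l hd (List.rel_of_pairwise_cons h.2.2.1 hg' ch hch) ?_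
        intro hh
        exact (h.1 _ (List.mem_cons_self ..) _ (List.mem_cons_of_mem _ hg')) (hh ▸ hch)
    rw [List.flatMap_congr (fun c hc => pvF_congr gs _ l hmem c)]
    rw [pvGroup_eq dc ls l hd, List.flatMap_assoc]
    refine List.flatMap_congr fun c hc => ?_
    show (pvF1 dc ls l c).flatMap (pvF gs l) = pvF ((dc, ls) :: gs) l c
    have hdcgs : ∀ g' ∈ gs, dc ∉ g'.2 :=
      fun g' hg' => h.1 _ (List.mem_cons_self ..) _ (List.mem_cons_of_mem _ hg')
    unfold pvF1 pvF
    split_ifs with h1 h2 h3 <;>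
      simp [pvF_of_not_mem gs l dc hdcgs]

lemma singleton_infix (a : Char) (l : List Char) : [a] <:+: l ↔ a ∈ l := by
  constructor
  · intro h; exact h.mem (by simp)
  · intro h; obtain ⟨s, t, rfl⟩ := List.append_of_mem h; exact ⟨s, t, by simp⟩

lemma find_neg_iff (nm d : String) (dc : Char) (hd : d.toList = [dc]) :
    PySem.Str.find nm d < 0 ↔ dc ∉ nm.toList := by
  rw [PySem.Str.find_eq, hd]
  have h1 := PySem.Chars.neg_one_le_find nm.toList [dc]
  rw [show (PySem.Chars.find nm.toList [dc] < 0 ↔ PySem.Chars.find nm.toList [dc] = -1) by omega,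
    PySem.Chars.find_eq_neg_one_iff, singleton_infix]

lemma replace_go_single (ch : Char) (r : List Char) : ∀ (fuel : Nat) (l acc : List Char),
    l.length ≤ fuel →
    PySem.Chars.replace.go [ch] r fuel l acc = acc.reverse ++ pvRepl ch r l := by
  intro fuel
  induction fuel with
  | zero =>
    intro l acc h
    have : l = [] := List.eq_nil_of_length_eq_zero (Nat.le_zero.mp h)
    subst this
    rw [PySem.Chars.replace.go]
    simp [pvRepl]
  | succ fuel ih =>
    intro l acc h
    cases l with
    | nil =>
      rw [PySem.Chars.replace.go]
      simp [pvRepl]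
      omega
    | cons c t =>
      rw [PySem.Chars.replace.go]
      by_cases hc : ch = c
      · subst hc
        simp only [List.isPrefixOf, BEq.rfl, Bool.and_eq_true]
        rw [show List.drop [ch].length (ch :: t) = t from rfl]
        rw [ih t _ (by simpa using h)]
        simp [pvRepl]
      · rw [if_neg (by simp [List.isPrefixOf, hc])]
        rw [ih t _ (by simpa using h)]
        simp [pvRepl, Ne.symm hc]

lemma replace_single (l : List Char) (ch : Char) (r : List Char) :
    PySem.Chars.replace l [ch] r = pvRepl ch r l := by
  rw [PySem.Chars.replace]
  rw [if_neg (by simp)]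
  rw [replace_go_single ch r l.length l [] le_rfl]
  simp

lemma step_str (nm : String) (ch : Char) (d : String) (dc : Char) (hd : d.toList = [dc]) :
    (if PySem.Str.find nm d < 0 then PySem.Str.replace nm (String.ofList [ch]) d
     else PySem.Str.replace nm (String.ofList [ch]) "").toList = pvStep dc nm.toList ch := by
  by_cases h : dc ∈ nm.toList
  · rw [if_neg (by rw [find_neg_iff nm d dc hd]; simpa), PySem.Str.toList_replace]
    rw [show ("" : String).toList = [] from rfl, String.toList_ofList, replace_single]
    rw [pvStep, if_pos h]
  · rw [if_pos ((find_neg_iff nm d dc hd).mpr h), PySem.Str.toList_replace]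
    rw [String.toList_ofList, hd, replace_single, pvStep, if_neg h]

lemma inner_str (lsS : List String) (lsC : List Char)
    (h : lsS = lsC.map fun c => String.ofList [c]) (d : String) (dc : Char)
    (hd : d.toList = [dc]) : ∀ (nm : String),
    (lsS.foldl (fun nm ch =>
      if PySem.Str.find nm d < 0 then PySem.Str.replace nm ch d
      else PySem.Str.replace nm ch "") nm).toList = pvGroup nm.toList (dc, lsC) := by
  subst h
  induction lsC with
  | nil => intro nm; rfl
  | cons ch rest ih =>
    intro nm
    simp only [List.map_cons, List.foldl_cons]
    rw [ih]
    show pvGroup _ (dc, rest) = pvGroup nm.toList (dc, ch :: rest)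
    rw [step_str nm ch d dc hd]
    rfl

lemma A_bridge (name : String) : (replaceWithDigits name).toList = pvA pvGroups name.toList := by
  unfold replaceWithDigits
  rw [show PySem.List.pyRange 0 6 = [0, 1, 2, 3, 4, 5] from rfl]
  simp only [List.foldl_cons, List.foldl_nil]
  simp only [pvA, pvGroups, List.foldl_cons, List.foldl_nil]
  rw [inner_str _ ['r'] (by decide) _ '6' (by decide)]
  rw [inner_str _ ['m','n'] (by decide) _ '5' (by decide)]
  rw [inner_str _ ['l'] (by decide) _ '4' (by decide)]
  rw [inner_str _ ['d','t'] (by decide) _ '3' (by decide)]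
  rw [inner_str _ ['c','g','j','k','q','s','x','z'] (by decide) _ '2' (by decide)]
  rw [inner_str _ ['b','f','p','v'] (by decide) _ '1' (by decide)]

lemma isIn_single (nm d : String) (dc : Char) (hd : d.toList = [dc]) :
    PySem.Str.isIn d nm = decide (dc ∈ nm.toList) := by
  have h := PySem.Chars.isIn_iff_infix d.toList nm.toList
  rw [hd, singleton_infix] at h
  show PySem.Chars.isIn d.toList nm.toList = _
  cases hb : PySem.Chars.isIn d.toList nm.toList <;> simp_all

lemma ofList_single_inj {a b : Char} (h : String.ofList [a] = String.ofList [b]) : a = b := by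
  have := congrArg String.toList h; simpa using this

lemma B_inner (name d : String) (dc : Char) (hd : d.toList = [dc]) :
    ∀ (lsC : List Char) (d0 : PySem.Dict String String) (kf : Bool), lsC.Nodup →
    (∀ c ∈ lsC,
      ((lsC.map (fun c => String.ofList [c])).foldl (fun st ch =>
          if !st.2 && PySem.Str.isIn ch name then (st.1.insert ch d, true)
          else (st.1.insert ch "", st.2)) (d0, kf)).1.get? (String.ofList [c])
        = some (if kf = false ∧ lsC.find? (fun x => decide (x ∈ name.toList)) = some c then d else "")) ∧
    (∀ x : String, (∀ c ∈ lsC, x ≠ String.ofList [c]) →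
      ((lsC.map (fun c => String.ofList [c])).foldl (fun st ch =>
          if !st.2 && PySem.Str.isIn ch name then (st.1.insert ch d, true)
          else (st.1.insert ch "", st.2)) (d0, kf)).1.get? x = d0.get? x) := by
  intro lsC
  induction lsC with
  | nil => intro d0 kf _; exact ⟨by simp, fun x _ => rfl⟩
  | cons ch rest ih =>
    intro d0 kf hnd
    have hchrest : ch ∉ rest := (List.nodup_cons.mp hnd).1
    have hndr : rest.Nodup := (List.nodup_cons.mp hnd).2
    have hisIn : PySem.Str.isIn (String.ofList [ch]) name = decide (ch ∈ name.toList) :=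
      isIn_single name _ ch (String.toList_ofList)
    simp only [List.map_cons, List.foldl_cons, hisIn]
    by_cases hcond : kf = false ∧ ch ∈ name.toList
    · rw [show (!kf && decide (ch ∈ name.toList)) = true by simp [hcond.1, hcond.2]]
      simp only [if_true]
      obtain ⟨ihA, ihB⟩ := ih (d0.insert (String.ofList [ch]) d) true hndr
      have key : ∀ c' ∈ rest, String.ofList [ch] ≠ String.ofList [c'] := by
        intro c' hc' h
        rw [ofList_single_inj h] at hchrest
        exact hchrest hc'
      constructor
      · intro c hc
        rcases List.mem_cons.mp hc with rfl | hc'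
        · rw [ihB _ key, PySem.Dict.get?_insert_self]
          rw [List.find?_cons, show decide (c ∈ name.toList) = true by simp [hcond.2]]
          simp [hcond.1]
        · rw [ihA c hc']
          rw [List.find?_cons, show decide (ch ∈ name.toList) = true by simp [hcond.2]]
          have : some ch ≠ some c := fun h => hchrest ((Option.some_inj.mp h) ▸ hc')
          simp [this]
      · intro x hx
        rw [ihB x (fun c hc => hx c (List.mem_cons_of_mem _ hc)),
          PySem.Dict.get?_insert, if_neg (hx ch (List.mem_cons_self ..))]
    · rw [show (!kf && decide (ch ∈ name.toList)) = false by
        cases kf <;> simp_all]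
      simp only [Bool.false_eq_true, if_false]
      obtain ⟨ihA, ihB⟩ := ih (d0.insert (String.ofList [ch]) "") kf hndr
      have key : ∀ c' ∈ rest, String.ofList [ch] ≠ String.ofList [c'] := by
        intro c' hc' h
        rw [ofList_single_inj h] at hchrest
        exact hchrest hc'
      constructor
      · intro c hc
        rcases List.mem_cons.mp hc with rfl | hc'
        · rw [ihB _ key, PySem.Dict.get?_insert_self]
          have hfalse : ¬ (kf = false ∧
              List.find? (fun x => decide (x ∈ name.toList)) (c :: rest) = some c) := by
            rintro ⟨hkf, hfind⟩
            have hchl : c ∉ name.toList := fun hl => hcond ⟨hkf, hl⟩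
            rw [List.find?_cons, show decide (c ∈ name.toList) = false by simp [hchl]] at hfind
            exact hchrest (List.mem_of_find?_eq_some hfind)
          rw [if_neg hfalse]
        · rw [ihA c hc']
          by_cases hkf : kf = false
          · have hchl : ch ∉ name.toList := fun hl => hcond ⟨hkf, hl⟩
            rw [List.find?_cons, show decide (ch ∈ name.toList) = false by simp [hchl]]
          · simp [hkf]
      · intro x hx
        rw [ihB x (fun c hc => hx c (List.mem_cons_of_mem _ hc)),
          PySem.Dict.get?_insert, if_neg (hx ch (List.mem_cons_self ..))]

lemma B_outer (name : String) : ∀ (gs : List (Char × List Char)) (d0 : PySem.Dict String String),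
    pvOK gs → ∀ c : Char,
    ((gs.map (fun g => (String.ofList [g.1], g.2.map (fun c => String.ofList [c])))).foldl
      (fun action p =>
        (p.2.foldl (fun (st : PySem.Dict String String × Bool) ch =>
            if !st.2 && PySem.Str.isIn ch name then (st.1.insert ch p.1, true)
            else (st.1.insert ch "", st.2)) (action, PySem.Str.isIn p.1 name)).1) d0).get?
        (String.ofList [c])
      = if ∃ g ∈ gs, c ∈ g.2 then some (String.ofList (pvF gs name.toList c))
        else d0.get? (String.ofList [c]) := by
  intro gs
  induction gs with
  | nil => intro d0 _ c; simp
  | cons g gs ih =>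
    intro d0 h c
    obtain ⟨dcg, ls⟩ := g
    have hnd : ls.Nodup := h.2.2.2 _ (List.mem_cons_self ..)
    simp only [List.map_cons, List.foldl_cons]
    obtain ⟨ihA, ihB⟩ := B_inner name (String.ofList [dcg]) dcg String.toList_ofList ls d0
      (PySem.Str.isIn (String.ofList [dcg]) name) hnd
    rw [ih _ (pvOK_tail h) c]
    by_cases hc : c ∈ ls
    · have hnot : ¬ ∃ g' ∈ gs, c ∈ g'.2 := by
        rintro ⟨g', hg', hcg'⟩
        exact List.rel_of_pairwise_cons h.2.2.1 hg' c hcg' hc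
      rw [if_neg hnot, ihA c hc,
        if_pos (⟨(dcg, ls), List.mem_cons_self .., hc⟩ : ∃ g ∈ (dcg, ls) :: gs, c ∈ g.2)]
      show _ = some (String.ofList (pvF ((dcg, ls) :: gs) name.toList c))
      rw [show pvF ((dcg, ls) :: gs) name.toList c =
        (if dcg ∈ name.toList then [] else
          if ls.find? (fun x => decide (x ∈ name.toList)) = some c then [dcg] else []) from by
          simp only [pvF]; rw [if_pos hc]]
      rw [isIn_single name _ dcg String.toList_ofList]
      by_cases hdcg : dcg ∈ name.toList
      · rw [if_pos hdcg]
        simp [hdcg]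
      · rw [if_neg hdcg]
        by_cases hf : ls.find? (fun x => decide (x ∈ name.toList)) = some c
        · rw [if_pos hf]; simp [hdcg, hf]
        · rw [if_neg hf]; simp [hdcg, hf]
    · rw [ihB (String.ofList [c]) (by
        intro c' hc' hh
        rw [ofList_single_inj hh] at hc
        exact hc hc')]
      have hpv : pvF ((dcg, ls) :: gs) name.toList c = pvF gs name.toList c := by
        simp only [pvF]; rw [if_neg hc]
      by_cases hex : ∃ g' ∈ gs, c ∈ g'.2
      · obtain ⟨g', hg', hcg'⟩ := hex
        rw [if_pos ⟨g', hg', hcg'⟩, if_pos ⟨g', List.mem_cons_of_mem _ hg', hcg'⟩, hpv]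
      · rw [if_neg hex, if_neg (by
          rintro ⟨g', hg', hcg'⟩
          rcases List.mem_cons.mp hg' with rfl | hg''
          · exact hc hcg'
          · exact hex ⟨g', hg'', hcg'⟩)]

lemma pvOK_groups : pvOK pvGroups := by
  unfold pvOK pvGroups
  refine ⟨?_, ?_, ?_, ?_⟩ <;> simp [List.pairwise_cons]

lemma join_nil_flatten : ∀ (ps : List (List Char)), PySem.Chars.join [] ps = ps.flatten := by
  intro ps
  induction ps with
  | nil => exact PySem.Chars.join_nil []
  | cons a t ih =>
    cases t with
    | nil => simp [PySem.Chars.join_singleton]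
    | cons b u =>
      rw [PySem.Chars.join_cons_cons, ih]
      simp

lemma B_bridge (name : String) :
    (replaceWithDigits_alt name).toList = name.toList.flatMap (pvF pvGroups name.toList) := by
  have h1 : consonantToDigit.items.map (fun p => (PySem.Int.toStr p.1, p.2)) =
      pvGroups.map (fun g => (String.ofList [g.1], g.2.map (fun c => String.ofList [c]))) := by
    decide
  have h2 := fun c => B_outer name pvGroups PySem.Dict.empty pvOK_groups c
  rw [← h1] at h2
  simp only [List.foldl_map] at h2
  simp only [replaceWithDigits_alt]
  rw [PySem.Str.toList_join, show ("" : String).toList = [] from rfl, join_nil_flatten,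
    List.map_map, List.flatMap_def]
  congr 1
  refine List.map_congr_left fun c hc => ?_
  show ((PySem.Dict.getD _ (String.ofList [c]) (String.ofList [c]))).toList = _
  rw [PySem.Dict.getD_eq_get?_getD, h2 c]
  by_cases hex : ∃ g ∈ pvGroups, c ∈ g.2
  · rw [if_pos hex]
    simp
  · rw [if_neg hex, PySem.Dict.get?_empty]
    rw [pvF_of_not_mem pvGroups name.toList c (fun g hg hcg => hex ⟨g, hg, hcg⟩)]
    simp

-- ===== VERDICT (by name: the statement is the Claim_ definition above) =====
theorem replaceWithDigits_spec : Claim_equal_replaceWithDigits := by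
  intro name _
  unfold Spec_replaceWithDigits
  apply String.ext
  rw [A_bridge, B_bridge, pvA_eq pvGroups pvOK_groups]
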